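-- pv_equiv track=rewrite | github.com/paulsportsza-hub/bot | card_data.py | _allocate_tips_by_tier
-- ===== SOURCE A (Python) =====
-- _TIER_ORDER = ["diamond", "gold", "silver", "bronze"]
--
-- _HOT_TIPS_ALLOC_TARGET = 10
--
-- def _allocate_tips_by_tier(tips: list[dict], min_per_tier: int = 3) -> list[dict]:
--     """Return a tier-aware Hot Tips list while preserving order within each tier."""
--     if not tips:
--         return []
--
--     min_count = max(int(min_per_tier or 0), 0)
--     grouped: dict[str, list[tuple[int, dict]]] = {tier: [] for tier in _TIER_ORDER}
--
--     for idx, tip in enumerate(tips):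
--         tier = (
--             tip.get("edge_tier")
--             or tip.get("display_tier")
--             or tip.get("edge_rating")
--             or tip.get("tier")
--             or "bronze"
--         )
--         tier_key = str(tier).lower().strip()
--         if tier_key not in grouped:
--             tier_key = "bronze"
--         grouped[tier_key].append((idx, tip))
--
--     allocated: list[dict] = []
--     selected_indexes: set[int] = set()
--
--     for tier in _TIER_ORDER:
--         for idx, tip in grouped[tier][:min_count]:
--             allocated.append(tip)
--             selected_indexes.add(idx)
--
--     target_count = max(min(len(tips), _HOT_TIPS_ALLOC_TARGET), len(allocated))
--     if len(allocated) >= target_count: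
--         return allocated
--
--     for tier in _TIER_ORDER:
--         for idx, tip in grouped[tier]:
--             if len(allocated) >= target_count:
--                 return allocated
--             if idx in selected_indexes:
--                 continue
--             allocated.append(tip)
--             selected_indexes.add(idx)
--
--     return allocated
-- ===== SOURCE B (Python) =====
-- _TIER_ORDER = ["diamond", "gold", "silver", "bronze"]
--
-- _HOT_TIPS_ALLOC_TARGET = 10
--
-- def _resolve_tier(tip):
--     for key in ("edge_tier", "display_tier", "edge_rating", "tier"):
--         value = tip.get(key)
--         if value:
--             tier = str(value).lower().strip()
--             return tier if tier in _TIER_ORDER else "bronze"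
--     return "bronze"
--
-- def _allocate_tips_by_tier(tips, min_per_tier=3):
--     if not tips:
--         return []
--     min_count = max(int(min_per_tier or 0), 0)
--     tiers = [_resolve_tier(tip) for tip in tips]
--     heads, tails = [], []
--     for tier in _TIER_ORDER:
--         group = [tip for tip, t in zip(tips, tiers) if t == tier]
--         heads.extend(group[:min_count])
--         tails.extend(group[min_count:])
--     target = max(min(len(tips), _HOT_TIPS_ALLOC_TARGET), len(heads))
--     return heads + tails[:target - len(heads)]
-- ===== Notes on version B (the rewrite author's own statement) =====
-- stated objective: simpler
-- what changed: A builds a dict of per-tier (index,tip) groups, fills a selected-index set, and runs a two-phase imperative loop with an early return; B resolves each tip's tier once, splits each tier's group into heads (first min_count) and tails by list slicing, and returns heads + tails[:target-len(heads)] computed arithmetically, with no dict of groups, no index set and no early-return loop.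
import Mathlib
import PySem

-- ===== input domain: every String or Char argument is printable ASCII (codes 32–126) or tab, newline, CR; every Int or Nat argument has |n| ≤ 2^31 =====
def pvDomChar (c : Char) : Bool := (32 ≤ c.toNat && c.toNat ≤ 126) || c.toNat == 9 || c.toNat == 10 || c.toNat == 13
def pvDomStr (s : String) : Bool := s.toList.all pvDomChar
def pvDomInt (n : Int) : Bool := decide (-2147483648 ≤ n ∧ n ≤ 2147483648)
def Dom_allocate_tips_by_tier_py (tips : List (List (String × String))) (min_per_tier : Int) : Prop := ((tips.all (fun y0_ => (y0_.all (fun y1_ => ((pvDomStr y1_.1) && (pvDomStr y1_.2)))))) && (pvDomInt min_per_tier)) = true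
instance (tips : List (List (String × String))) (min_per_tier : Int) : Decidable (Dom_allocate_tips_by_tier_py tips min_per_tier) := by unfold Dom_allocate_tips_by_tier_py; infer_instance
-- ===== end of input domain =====

-- B replaces A's dict-of-groups + selected-index set + early-return fill loop by a declarative
-- heads/tails decomposition (per-tier filter, slice arithmetic); objective: simpler, same cost.

-- ===== PORT A =====
def pvTierOrder : List String := ["diamond", "gold", "silver", "bronze"]

-- Python's `x or y` where x is `tip.get(k)` (None or a string): None and "" are falsy
def pvOrFalsy (o : Option String) (rest : String) : String :=
  match o with
  | some v => if v = "" then rest else v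
  | none => rest

-- body of A's grouping loop
def pvGroupStep (g : PySem.Dict String (List (Int × List (String × String)))) (p : Int × List (String × String)) : PySem.Dict String (List (Int × List (String × String))) :=
  let tier := pvOrFalsy (PySem.Dict.get? (PySem.Dict.mk p.2) "edge_tier")
    (pvOrFalsy (PySem.Dict.get? (PySem.Dict.mk p.2) "display_tier")
      (pvOrFalsy (PySem.Dict.get? (PySem.Dict.mk p.2) "edge_rating")
        (pvOrFalsy (PySem.Dict.get? (PySem.Dict.mk p.2) "tier") "bronze")))
  let tier_key := PySem.Str.strip (PySem.Str.lower tier)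
  let tier_key := if PySem.Dict.contains g tier_key then tier_key else "bronze"
  PySem.Dict.modify g tier_key [] (fun l => l ++ [(p.1, p.2)])

-- body of A's first (min_count) allocation loop
def pvTakeStep (st : List (List (String × String)) × PySem.Set Int) (q : Int × List (String × String)) : List (List (String × String)) × PySem.Set Int :=
  (st.1 ++ [q.2], PySem.Set.add st.2 q.1)

-- body of A's final fill loop; Python's early `return` freezes the state once the target is
-- reached, which is exactly what the first branch does, so the fold is exact
def pvFillStep (target : Int) (st : List (List (String × String)) × PySem.Set Int) (q : Int × List (String × String)) : List (List (String × String)) × PySem.Set Int :=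
  if target ≤ PySem.List.len st.1 then st
  else if PySem.Set.contains st.2 q.1 then st
  else (st.1 ++ [q.2], PySem.Set.add st.2 q.1)

def allocate_tips_by_tier_py (tips : List (List (String × String))) (min_per_tier : Int) : List (List (String × String)) :=
  if tips = [] then []
  else
    let min_count : Int := max (if min_per_tier = 0 then 0 else min_per_tier) 0
    let grouped0 : PySem.Dict String (List (Int × List (String × String))) :=
      PySem.Dict.ofList (pvTierOrder.map (fun t => (t, ([] : List (Int × List (String × String))))))
    let grouped := (PySem.List.enumerate tips).foldl pvGroupStep grouped0
    -- grouped[tier] always exists (keys are exactly _TIER_ORDER), so getD is exact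
    let st1 := pvTierOrder.foldl (fun st tier =>
      (PySem.List.slice (PySem.Dict.getD grouped tier []) none (some min_count)).foldl pvTakeStep st)
      ([], PySem.Set.empty)
    let target_count : Int := max (min (PySem.List.len tips) 10) (PySem.List.len st1.1)
    if target_count ≤ PySem.List.len st1.1 then st1.1
    else (pvTierOrder.foldl (fun st tier =>
      (PySem.Dict.getD grouped tier []).foldl (pvFillStep target_count) st) st1).1

-- ===== PORT B =====
def pvTierOrderB : List String := ["diamond", "gold", "silver", "bronze"]

def pvResolveGo (tip : List (String × String)) : List String → String
  | [] => "bronze"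
  | k :: ks =>
    match PySem.Dict.get? (PySem.Dict.mk tip) k with
    | some v =>
      if v ≠ "" then
        let t := PySem.Str.strip (PySem.Str.lower v)
        if pvTierOrderB.contains t then t else "bronze"
      else pvResolveGo tip ks
    | none => pvResolveGo tip ks

def pvResolveTier (tip : List (String × String)) : String :=
  pvResolveGo tip ["edge_tier", "display_tier", "edge_rating", "tier"]

def allocate_tips_by_tier_py_alt (tips : List (List (String × String))) (min_per_tier : Int) : List (List (String × String)) :=
  if tips = [] then []
  else
    let min_count : Int := max (if min_per_tier = 0 then 0 else min_per_tier) 0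
    let tiers := tips.map pvResolveTier
    let ht := pvTierOrderB.foldl (fun (ht : List (List (String × String)) × List (List (String × String))) tier =>
      let group := ((tips.zip tiers).filter (fun p => p.2 == tier)).map Prod.fst
      (ht.1 ++ PySem.List.slice group none (some min_count),
       ht.2 ++ PySem.List.slice group (some min_count) none)) ([], [])
    let target : Int := max (min (PySem.List.len tips) 10) (PySem.List.len ht.1)
    ht.1 ++ PySem.List.slice ht.2 none (some (target - PySem.List.len ht.1))

-- ===== PRECONDITION & SPEC =====
def Spec_allocate_tips_by_tier_py (tips : List (List (String × String))) (min_per_tier : Int) (out : List (List (String × String))) : Prop := out = allocate_tips_by_tier_py_alt tips min_per_tier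
instance (tips : List (List (String × String))) (min_per_tier : Int) (out : List (List (String × String))) : Decidable (Spec_allocate_tips_by_tier_py tips min_per_tier out) := by unfold Spec_allocate_tips_by_tier_py; infer_instance

-- ===== CLAIM (what is proved, stated in full; the proofs are below) =====
def Claim_equal_allocate_tips_by_tier_py : Prop := ∀ (tips : List (List (String × String))) (min_per_tier : Int), Dom_allocate_tips_by_tier_py tips min_per_tier → Spec_allocate_tips_by_tier_py tips min_per_tier (allocate_tips_by_tier_py tips min_per_tier)

-- ===== LEMMAS AND PROOFS =====

-- the tier groups, as index-stamped filters of the enumerated input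
def pvG (tips : List (List (String × String))) (t : String) : List (Int × List (String × String)) :=
  (PySem.List.enumerate tips).filter (fun p => pvResolveTier p.2 == t)

-- phase-1 selection (first min_count of each tier, in tier order), with indexes
def pvHeads (tips : List (List (String × String))) (n : Nat) : List (Int × List (String × String)) :=
  (pvG tips "diamond").take n ++ (pvG tips "gold").take n ++ (pvG tips "silver").take n ++ (pvG tips "bronze").take n

def pvTails (tips : List (List (String × String))) (n : Nat) : List (Int × List (String × String)) :=
  (pvG tips "diamond").drop n ++ (pvG tips "gold").drop n ++ (pvG tips "silver").drop n ++ (pvG tips "bronze").drop n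

-- the common normal form both ports are reduced to
def pvCanon (tips : List (List (String × String))) (min_per_tier : Int) : List (List (String × String)) :=
  let mc : Int := max (if min_per_tier = 0 then 0 else min_per_tier) 0
  let n := mc.toNat
  let heads := (pvHeads tips n).map (fun q => q.2)
  let tails := (pvTails tips n).map (fun q => q.2)
  let target : Int := max (min (tips.length : Int) 10) (heads.length : Int)
  heads ++ tails.take (target - (heads.length : Int)).toNat

lemma pv_key_aux (tip : List (String × String)) (ks : List String) :
    (let tk := PySem.Str.strip (PySem.Str.lower (ks.foldr (fun k rest => pvOrFalsy (PySem.Dict.get? (PySem.Dict.mk tip) k) rest) "bronze"));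
     if pvTierOrder.contains tk then tk else "bronze") = pvResolveGo tip ks := by
  induction ks with
  | nil =>
    simp only [List.foldr_nil, pvResolveGo]
    decide
  | cons k ks ih =>
    simp only [List.foldr_cons, pvResolveGo]
    cases h1 : PySem.Dict.get? (PySem.Dict.mk tip) k with
    | none => simpa [pvOrFalsy] using ih
    | some v =>
      by_cases hv : v = ""
      · simpa [pvOrFalsy, hv] using ih
      · simp only [pvOrFalsy, hv, ne_eq, not_false_iff, if_pos]
        simp [pvTierOrder, pvTierOrderB]

-- A's per-item tier key (with the membership test done against the fixed key list) is B's resolver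
lemma pv_keyA_eq (tip : List (String × String)) :
    (if pvTierOrder.contains (PySem.Str.strip (PySem.Str.lower (pvOrFalsy (PySem.Dict.get? (PySem.Dict.mk tip) "edge_tier")
        (pvOrFalsy (PySem.Dict.get? (PySem.Dict.mk tip) "display_tier")
          (pvOrFalsy (PySem.Dict.get? (PySem.Dict.mk tip) "edge_rating")
            (pvOrFalsy (PySem.Dict.get? (PySem.Dict.mk tip) "tier") "bronze"))))))
     then PySem.Str.strip (PySem.Str.lower (pvOrFalsy (PySem.Dict.get? (PySem.Dict.mk tip) "edge_tier")
        (pvOrFalsy (PySem.Dict.get? (PySem.Dict.mk tip) "display_tier")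
          (pvOrFalsy (PySem.Dict.get? (PySem.Dict.mk tip) "edge_rating")
            (pvOrFalsy (PySem.Dict.get? (PySem.Dict.mk tip) "tier") "bronze")))))
     else "bronze") = pvResolveTier tip := by
  exact pv_key_aux tip ["edge_tier", "display_tier", "edge_rating", "tier"]

lemma pv_g0_keys :
    (PySem.Dict.ofList (pvTierOrder.map (fun t => (t, ([] : List (Int × List (String × String))))))).keys = pvTierOrder := by
  decide

lemma pv_g0_getD (t : String) :
    (PySem.Dict.ofList (pvTierOrder.map (fun t => (t, ([] : List (Int × List (String × String))))))).getD t [] = [] := by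
  have h : PySem.Dict.ofList (pvTierOrder.map (fun t => (t, ([] : List (Int × List (String × String))))))
      = PySem.Dict.mk [("diamond", []), ("gold", []), ("silver", []), ("bronze", [])] := by decide
  rw [h]
  simp [PySem.Dict.getD_eq_get?_getD, PySem.Dict.get?_mk_cons]
  split_ifs <;> rfl

lemma pv_resolve_mem (tip : List (String × String)) : pvResolveTier tip ∈ pvTierOrder := by
  unfold pvResolveTier
  generalize ["edge_tier", "display_tier", "edge_rating", "tier"] = ks
  induction ks with
  | nil => simp [pvResolveGo]; decide
  | cons k ks ih =>
    simp only [pvResolveGo]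
    cases PySem.Dict.get? (PySem.Dict.mk tip) k with
    | none => exact ih
    | some v =>
      by_cases hv : v = ""
      · simpa [hv] using ih
      · simp only [hv, ne_eq, not_false_iff, if_pos]
        by_cases hc : pvTierOrderB.contains (PySem.Str.strip (PySem.Str.lower v))
        · simp only [hc, if_pos]
          have := (List.contains_iff_mem).mp hc
          simpa [pvTierOrder, pvTierOrderB] using this
        · simp only [hc]
          simp [pvTierOrder]

def pvStepFix (g : PySem.Dict String (List (Int × List (String × String)))) (p : Int × List (String × String)) : PySem.Dict String (List (Int × List (String × String))) :=
  PySem.Dict.modify g (pvResolveTier p.2) [] (fun l => l ++ [(p.1, p.2)])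

lemma pv_group_fold (l : List (Int × List (String × String))) :
    ∀ g : PySem.Dict String (List (Int × List (String × String))), g.keys = pvTierOrder →
    l.foldl pvGroupStep g = l.foldl pvStepFix g := by
  induction l with
  | nil => intro g h; rfl
  | cons p l ih =>
    intro g hk
    have hc : ∀ tk : String, PySem.Dict.contains g tk = pvTierOrder.contains tk := by
      intro tk
      rw [Bool.eq_iff_iff, PySem.Dict.contains_iff_mem_keys, hk, List.contains_iff_mem]
    have hstep : pvGroupStep g p = pvStepFix g p := by
      unfold pvGroupStep pvStepFix
      simp only [hc, pv_keyA_eq]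
    have hkeys : (pvStepFix g p).keys = pvTierOrder := by
      unfold pvStepFix
      rw [PySem.Dict.keys_modify, PySem.Dict.keys_insert_of_contains, hk]
      rw [hc, List.contains_iff_mem]
      exact pv_resolve_mem p.2
    rw [List.foldl_cons, List.foldl_cons, hstep, ih _ (hstep ▸ hkeys)]

lemma pv_grouped_getD (tips : List (List (String × String))) (t : String) :
    ((PySem.List.enumerate tips).foldl pvGroupStep
      (PySem.Dict.ofList (List.map (fun t => (t, ([] : List (Int × List (String × String))))) ["diamond", "gold", "silver", "bronze"]))).getD t []
    = pvG tips t := by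
  have hlit : (["diamond", "gold", "silver", "bronze"] : List String) = pvTierOrder := rfl
  rw [hlit]
  rw [pv_group_fold _ _ pv_g0_keys]
  have hmap : (PySem.List.enumerate tips).foldl pvStepFix
      (PySem.Dict.ofList (pvTierOrder.map (fun t => (t, ([] : List (Int × List (String × String)))))))
      = ((PySem.List.enumerate tips).map (fun p => (pvResolveTier p.2, p))).foldl
          (fun d q => PySem.Dict.modify d q.1 [] (fun x => x ++ [q.2]))
          (PySem.Dict.ofList (pvTierOrder.map (fun t => (t, ([] : List (Int × List (String × String))))))) := by
    rw [List.foldl_map]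
    rfl
  rw [hmap, PySem.Dict.getD_foldl_modify_append, pv_g0_getD]
  simp [pvG, List.filter_map, Function.comp_def]

-- A's phase-1 inner loop: append the tips, record the indexes
lemma pv_phase1_step (s : List (Int × List (String × String))) (st : List (List (String × String)) × PySem.Set Int) :
    s.foldl pvTakeStep st = (st.1 ++ s.map (fun q => q.2), st.2.update (s.map (fun q => q.1))) := by
  obtain ⟨a, b⟩ := st
  unfold pvTakeStep
  rw [PySem.List.foldl_prod_mk (f := fun a (q : Int × List (String × String)) => a ++ [q.2]) (g := fun b (q : Int × List (String × String)) => PySem.Set.add b q.1)]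
  rw [PySem.List.foldl_append_singleton_eq_map, ← PySem.Set.update_map_eq_foldl_add]

-- index bookkeeping -----------------------------------------------------------
lemma pv_nodup_fst (tips : List (List (String × String))) (t : String) :
    ((pvG tips t).map Prod.fst).Nodup := by
  have h1 : ((PySem.List.enumerate tips 0).map Prod.fst).Nodup := by
    rw [PySem.List.map_fst_enumerate]
    exact PySem.List.nodup_pyRange_one _ _
  exact List.Nodup.sublist (List.Sublist.map Prod.fst List.filter_sublist) h1

lemma pv_disj (tips : List (List (String × String))) {t t' : String} {i : Int}
    (h : i ∈ (pvG tips t).map Prod.fst) (h' : i ∈ (pvG tips t').map Prod.fst) : t = t' := by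
  obtain ⟨p, hp, hpe⟩ := List.mem_map.mp h
  obtain ⟨q, hq, hqe⟩ := List.mem_map.mp h'
  have hnd : ((PySem.List.enumerate tips 0).map Prod.fst).Nodup := by
    rw [PySem.List.map_fst_enumerate]
    exact PySem.List.nodup_pyRange_one _ _
  have hpE : p ∈ PySem.List.enumerate tips 0 := List.mem_of_mem_filter hp
  have hqE : q ∈ PySem.List.enumerate tips 0 := List.mem_of_mem_filter hq
  have hpq : p = q := List.inj_on_of_nodup_map hnd hpE hqE (hpe.trans hqe.symm)
  have h1 : pvResolveTier p.2 = t := by simpa using List.of_mem_filter hp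
  have h2 : pvResolveTier q.2 = t' := by simpa using List.of_mem_filter hq
  rw [← h1, ← h2, hpq]

lemma pv_take_fst_sub (tips : List (List (String × String))) (t : String) (n : Nat) {i : Int}
    (h : i ∈ ((pvG tips t).take n).map Prod.fst) : i ∈ (pvG tips t).map Prod.fst := by
  obtain ⟨p, hp, hpe⟩ := List.mem_map.mp h
  exact hpe ▸ List.mem_map_of_mem (List.mem_of_mem_take hp)

lemma pv_drop_fst_sub (tips : List (List (String × String))) (t : String) (n : Nat) {i : Int}
    (h : i ∈ ((pvG tips t).drop n).map Prod.fst) : i ∈ (pvG tips t).map Prod.fst := by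
  obtain ⟨p, hp, hpe⟩ := List.mem_map.mp h
  exact hpe ▸ List.mem_map_of_mem (List.mem_of_mem_drop hp)

lemma pv_drop_not_head (tips : List (List (String × String))) (t : String) (n : Nat)
    {q : Int × List (String × String)} (hq : q ∈ (pvG tips t).drop n) :
    q.1 ∉ (pvHeads tips n).map Prod.fst := by
  intro hmem
  have hdropmem : q.1 ∈ ((pvG tips t).drop n).map Prod.fst := List.mem_map_of_mem hq
  have hG : q.1 ∈ (pvG tips t).map Prod.fst := pv_drop_fst_sub tips t n hdropmem
  have hcase : ∀ t' : String, q.1 ∈ ((pvG tips t').take n).map Prod.fst → False := by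
    intro t' htake
    have hG' : q.1 ∈ (pvG tips t').map Prod.fst := pv_take_fst_sub tips t' n htake
    have ht : t = t' := pv_disj tips hG hG'
    subst ht
    have hnd : (((pvG tips t).take n).map Prod.fst ++ ((pvG tips t).drop n).map Prod.fst).Nodup := by
      rw [← List.map_append, List.take_append_drop]
      exact pv_nodup_fst tips t
    exact (List.nodup_append.mp hnd).2.2 q.1 htake q.1 hdropmem rfl
  unfold pvHeads at hmem
  simp only [List.map_append, List.mem_append] at hmem
  rcases hmem with ((h1 | h2) | h3) | h4
  · exact hcase _ h1
  · exact hcase _ h2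
  · exact hcase _ h3
  · exact hcase _ h4

-- fill loop -------------------------------------------------------------------
lemma pv_fill_skip (target : Int) (s : List (Int × List (String × String))) :
    ∀ st : List (List (String × String)) × PySem.Set Int, (∀ q ∈ s, q.1 ∈ st.2) →
    s.foldl (pvFillStep target) st = st := by
  induction s with
  | nil => intro st h; rfl
  | cons q s ih =>
    intro st h
    have hstep : pvFillStep target st q = st := by
      unfold pvFillStep
      split_ifs with h1 h2
      · rfl
      · rfl
      · exact absurd ((PySem.Set.contains_iff st.2 q.1).mpr (h q List.mem_cons_self)) h2
    rw [List.foldl_cons, hstep]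
    exact ih st (fun r hr => h r (List.mem_cons_of_mem q hr))

lemma pv_fill_run (target : Int) (s : List (Int × List (String × String))) :
    ∀ (alloc : List (List (String × String))) (sel : PySem.Set Int),
    (s.map Prod.fst).Nodup → (∀ q ∈ s, q.1 ∉ sel) →
    (s.foldl (pvFillStep target) (alloc, sel)).1
        = alloc ++ (s.map (fun q => q.2)).take ((target - (alloc.length : Int)).toNat)
    ∧ (∀ i : Int, i ∈ (s.foldl (pvFillStep target) (alloc, sel)).2 → i ∈ sel ∨ i ∈ s.map Prod.fst)
    ∧ (∀ i : Int, i ∈ sel → i ∈ (s.foldl (pvFillStep target) (alloc, sel)).2) := by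
  induction s with
  | nil =>
    intro alloc sel hnd hdisj
    exact ⟨by simp, by simp, fun i hi => hi⟩
  | cons q s ih =>
    intro alloc sel hnd hdisj
    have hq1 : q.1 ∉ sel := hdisj q List.mem_cons_self
    have hnd0 : (q.1 :: s.map Prod.fst).Nodup := by simpa using hnd
    have hnd' : (s.map Prod.fst).Nodup := (List.nodup_cons.mp hnd0).2
    have hq1s : q.1 ∉ s.map Prod.fst := (List.nodup_cons.mp hnd0).1
    by_cases h1 : target ≤ PySem.List.len alloc
    · have hstep : pvFillStep target (alloc, sel) q = (alloc, sel) := by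
        unfold pvFillStep
        exact if_pos h1
      rw [List.foldl_cons, hstep]
      obtain ⟨ha, hb, hc⟩ := ih alloc sel hnd' (fun r hr => hdisj r (List.mem_cons_of_mem q hr))
      refine ⟨?_, fun i hi => (hb i hi).imp id (fun h => by simp [h]), hc⟩
      rw [ha]
      have hz : (target - (alloc.length : Int)).toNat = 0 := by
        simp only [PySem.List.len_eq] at h1
        omega
      simp [hz]
    · have hcont : PySem.Set.contains sel q.1 = false := by
        cases hcc : PySem.Set.contains sel q.1
        · rfl
        · exact absurd ((PySem.Set.contains_iff sel q.1).mp hcc) hq1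
      have hstep : pvFillStep target (alloc, sel) q = (alloc ++ [q.2], PySem.Set.add sel q.1) := by
        unfold pvFillStep
        rw [if_neg h1, hcont]
        simp
      rw [List.foldl_cons, hstep]
      obtain ⟨ha, hb, hc⟩ := ih (alloc ++ [q.2]) (PySem.Set.add sel q.1) hnd' (fun r hr hrin => by
        rcases (PySem.Set.mem_add sel q.1 r.1).mp hrin with h | h
        · exact hdisj r (List.mem_cons_of_mem q hr) h
        · exact hq1s (h ▸ List.mem_map_of_mem hr))
      refine ⟨?_, fun i hi => ?_, fun i hi => hc i ((PySem.Set.mem_add sel q.1 i).mpr (Or.inl hi))⟩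
      · rw [ha]
        have h1' : (alloc.length : Int) < target := by
          simp only [PySem.List.len_eq] at h1
          omega
        have harith : (target - (alloc.length : Int)).toNat = (target - ((alloc ++ [q.2]).length : Int)).toNat + 1 := by
          simp only [List.length_append, List.length_cons, List.length_nil]
          push_cast
          omega
        simp only [List.map_cons]
        rw [harith, List.take_succ_cons]
        simp [List.append_assoc]
      · rcases hb i hi with h | h
        · rcases (PySem.Set.mem_add sel q.1 i).mp h with h' | h'
          · exact Or.inl h'
          · exact Or.inr (by simp [h'])
        · exact Or.inr (by simp [h])

-- one tier of the fill loop: the still-unselected items are exactly the dropped tail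
lemma pv_fill_one (target : Int) (tips : List (List (String × String))) (n : Nat) (t : String)
    (st : List (List (String × String)) × PySem.Set Int)
    (hin : ∀ q ∈ (pvG tips t).take n, q.1 ∈ st.2)
    (hout : ∀ q ∈ (pvG tips t).drop n, q.1 ∉ st.2) :
    ((pvG tips t).foldl (pvFillStep target) st).1
        = st.1 ++ (((pvG tips t).drop n).map (fun q => q.2)).take ((target - (st.1.length : Int)).toNat)
    ∧ (∀ i : Int, i ∈ ((pvG tips t).foldl (pvFillStep target) st).2 → i ∈ st.2 ∨ i ∈ (pvG tips t).map Prod.fst)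
    ∧ (∀ i : Int, i ∈ st.2 → i ∈ ((pvG tips t).foldl (pvFillStep target) st).2) := by
  obtain ⟨alloc, sel⟩ := st
  simp only at hin hout ⊢
  have hnodup := pv_nodup_fst tips t
  have hfold : (pvG tips t).foldl (pvFillStep target) (alloc, sel) = ((pvG tips t).drop n).foldl (pvFillStep target) (alloc, sel) := by
    conv_lhs => rw [← List.take_append_drop n (pvG tips t)]
    rw [List.foldl_append, pv_fill_skip target _ (alloc, sel) hin]
  rw [hfold]
  have hndd : (((pvG tips t).drop n).map Prod.fst).Nodup :=
    List.Nodup.sublist (List.Sublist.map Prod.fst (List.drop_sublist n (pvG tips t))) hnodup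
  obtain ⟨ha, hb, hc⟩ := pv_fill_run target _ alloc sel hndd hout
  exact ⟨ha, fun i hi => (hb i hi).imp id (pv_drop_fst_sub tips t n), hc⟩

-- one step of re-associating the fill chain into a single take
lemma pv_step (target : Int) (H U T : List (List (String × String))) :
    (H ++ U.take ((target - (H.length : Int)).toNat)) ++ T.take ((target - (((H ++ U.take ((target - (H.length : Int)).toNat)).length : Int))).toNat)
      = H ++ (U ++ T).take ((target - (H.length : Int)).toNat) := by
  have hk : ((target - (((H ++ U.take ((target - (H.length : Int)).toNat)).length : Int))).toNat)
      = ((target - (H.length : Int)).toNat) - U.length := by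
    simp only [List.length_append, List.length_take]
    push_cast
    omega
  rw [hk, List.append_assoc, ← List.take_append]

lemma pv_groupB_aux (t : String) (tips : List (List (String × String))) : ∀ s : Int,
    ((tips.zip (tips.map pvResolveTier)).filter (fun p => p.2 == t)).map Prod.fst
      = ((PySem.List.enumerate tips s).filter (fun p => pvResolveTier p.2 == t)).map (fun q => q.2) := by
  induction tips with
  | nil => intro s; rfl
  | cons x xs ih =>
    intro s
    simp only [List.map_cons, List.zip_cons_cons, PySem.List.enumerate_cons, List.filter_cons]
    by_cases h : pvResolveTier x = t
    · simp [h, ih (s + 1)]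
    · simp [h, ih (s + 1)]

-- B-side: the per-tier groups of B are the (index-forgetting) groups of A
lemma pv_groupB (tips : List (List (String × String))) (t : String) :
    ((tips.zip (tips.map pvResolveTier)).filter (fun p => p.2 == t)).map Prod.fst
      = (pvG tips t).map (fun q => q.2) := by
  simpa [pvG] using pv_groupB_aux t tips 0

lemma pvB_eq (tips : List (List (String × String))) (m : Int) :
    allocate_tips_by_tier_py_alt tips m = if tips = [] then [] else pvCanon tips m := by
  by_cases h0 : tips = []
  · simp [allocate_tips_by_tier_py_alt, h0]
  · rw [if_neg h0]
    unfold allocate_tips_by_tier_py_alt pvCanon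
    rw [if_neg h0]
    have hmc : (0:Int) ≤ max (if m = 0 then 0 else m) 0 := le_max_right _ _
    simp only [pvTierOrderB, List.foldl_cons, List.foldl_nil]
    simp only [pv_groupB]
    simp only [PySem.List.slice_to _ hmc, PySem.List.slice_from _ hmc]
    rw [PySem.List.slice_to _ (sub_nonneg.mpr (le_max_right _ _))]
    simp [PySem.List.len_eq, pvHeads, pvTails, List.map_append, List.map_take, List.map_drop, List.append_assoc]

lemma pv_head_mem_of_take (tips : List (List (String × String))) (n : Nat) (t : String)
    (ht : t = "diamond" ∨ t = "gold" ∨ t = "silver" ∨ t = "bronze") {i : Int}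
    (h : i ∈ ((pvG tips t).take n).map (fun q => q.1)) : i ∈ (pvHeads tips n).map Prod.fst := by
  have h' : i ∈ ((pvG tips t).take n).map Prod.fst := by simpa using h
  unfold pvHeads
  simp only [List.map_append, List.mem_append]
  rcases ht with h1 | h1 | h1 | h1 <;> subst h1 <;> tauto

lemma pv_drop_not_other (tips : List (List (String × String))) (n : Nat) {t t' : String}
    (hne : t ≠ t') {q : Int × List (String × String)} (hq : q ∈ (pvG tips t).drop n)
    (h : q.1 ∈ (pvG tips t').map Prod.fst) : False :=
  hne (pv_disj tips (pv_drop_fst_sub tips t n (List.mem_map_of_mem hq)) h)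

lemma pvA_eq (tips : List (List (String × String))) (m : Int) :
    allocate_tips_by_tier_py tips m = if tips = [] then [] else pvCanon tips m := by
  by_cases h0 : tips = []
  · simp [allocate_tips_by_tier_py, h0]
  · rw [if_neg h0]
    unfold allocate_tips_by_tier_py pvCanon
    rw [if_neg h0]
    have hmc : (0:Int) ≤ max (if m = 0 then 0 else m) 0 := le_max_right _ _
    simp only [pvTierOrder, List.foldl_cons, List.foldl_nil]
    simp only [pv_grouped_getD]
    simp only [PySem.List.slice_to _ hmc]
    simp only [pv_phase1_step, List.nil_append, PySem.List.len_eq]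
    simp only [pvHeads, pvTails, List.map_append]
    set n := (max (if m = 0 then 0 else m) 0).toNat with hn
    set G1 := List.map (fun q : Int × List (String × String) => q.2) ((pvG tips "diamond").take n) with hG1
    set G2 := List.map (fun q : Int × List (String × String) => q.2) ((pvG tips "gold").take n) with hG2
    set G3 := List.map (fun q : Int × List (String × String) => q.2) ((pvG tips "silver").take n) with hG3
    set G4 := List.map (fun q : Int × List (String × String) => q.2) ((pvG tips "bronze").take n) with hG4
    set I1 := List.map (fun q : Int × List (String × String) => q.1) ((pvG tips "diamond").take n) with hI1
    set I2 := List.map (fun q : Int × List (String × String) => q.1) ((pvG tips "gold").take n) with hI2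
    set I3 := List.map (fun q : Int × List (String × String) => q.1) ((pvG tips "silver").take n) with hI3
    set I4 := List.map (fun q : Int × List (String × String) => q.1) ((pvG tips "bronze").take n) with hI4
    set H := G1 ++ G2 ++ G3 ++ G4 with hH
    set S := (((PySem.Set.empty.update I1).update I2).update I3).update I4 with hS
    set target := max (min ((tips.length : Nat) : Int) 10) ((H.length : Nat) : Int) with htgt
    have hHt : (H.length : Int) ≤ target := by
      rw [htgt]; exact le_max_right _ _
    have hselmem : ∀ i : Int, i ∈ S ↔ i ∈ (pvHeads tips n).map Prod.fst := by
      intro i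
      rw [hS, hI1, hI2, hI3, hI4]
      unfold pvHeads
      simp [PySem.Set.mem_update, PySem.Set.empty, List.map_append, or_assoc]
    split_ifs with hbr
    · have htz : (target - (H.length : Int)).toNat = 0 := by omega
      simp [htz]
    · obtain ⟨e1, b1, m1⟩ := pv_fill_one target tips n "diamond" (H, S)
        (fun q hq => (hselmem q.1).mpr (pv_head_mem_of_take tips n "diamond" (Or.inl rfl) (List.mem_map_of_mem hq)))
        (fun q hq hmem => pv_drop_not_head tips "diamond" n hq ((hselmem q.1).mp hmem))
      obtain ⟨e2, b2, m2⟩ := pv_fill_one target tips n "gold" (List.foldl (pvFillStep target) (H, S) (pvG tips "diamond"))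
        (fun q hq => m1 q.1 ((hselmem q.1).mpr (pv_head_mem_of_take tips n "gold" (Or.inr (Or.inl rfl)) (List.mem_map_of_mem hq))))
        (fun q hq hmem => by
          rcases b1 q.1 hmem with h | h
          · exact pv_drop_not_head tips "gold" n hq ((hselmem q.1).mp h)
          · exact pv_drop_not_other tips n (by decide : ("gold" : String) ≠ "diamond") hq h)
      obtain ⟨e3, b3, m3⟩ := pv_fill_one target tips n "silver"
          (List.foldl (pvFillStep target) (List.foldl (pvFillStep target) (H, S) (pvG tips "diamond")) (pvG tips "gold"))
        (fun q hq => m2 q.1 (m1 q.1 ((hselmem q.1).mpr (pv_head_mem_of_take tips n "silver" (Or.inr (Or.inr (Or.inl rfl))) (List.mem_map_of_mem hq)))))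
        (fun q hq hmem => by
          rcases b2 q.1 hmem with h | h
          · rcases b1 q.1 h with h' | h'
            · exact pv_drop_not_head tips "silver" n hq ((hselmem q.1).mp h')
            · exact pv_drop_not_other tips n (by decide : ("silver" : String) ≠ "diamond") hq h'
          · exact pv_drop_not_other tips n (by decide : ("silver" : String) ≠ "gold") hq h)
      obtain ⟨e4, b4, m4⟩ := pv_fill_one target tips n "bronze"
          (List.foldl (pvFillStep target) (List.foldl (pvFillStep target) (List.foldl (pvFillStep target) (H, S) (pvG tips "diamond")) (pvG tips "gold")) (pvG tips "silver"))
        (fun q hq => m3 q.1 (m2 q.1 (m1 q.1 ((hselmem q.1).mpr (pv_head_mem_of_take tips n "bronze" (Or.inr (Or.inr (Or.inr rfl))) (List.mem_map_of_mem hq))))))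
        (fun q hq hmem => by
          rcases b3 q.1 hmem with h | h
          · rcases b2 q.1 h with h' | h'
            · rcases b1 q.1 h' with h'' | h''
              · exact pv_drop_not_head tips "bronze" n hq ((hselmem q.1).mp h'')
              · exact pv_drop_not_other tips n (by decide : ("bronze" : String) ≠ "diamond") hq h''
            · exact pv_drop_not_other tips n (by decide : ("bronze" : String) ≠ "gold") hq h'
          · exact pv_drop_not_other tips n (by decide : ("bronze" : String) ≠ "silver") hq h)
      rw [e4, e3, e2, e1]
      rw [pv_step, pv_step, pv_step]
      simp [List.append_assoc]

-- ===== VERDICT (by name: the statement is the Claim_ definition above) =====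
theorem allocate_tips_by_tier_py_spec : Claim_equal_allocate_tips_by_tier_py := by
  intro tips m _
  unfold Spec_allocate_tips_by_tier_py
  rw [pvA_eq, pvB_eq]
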